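-- pv_equiv track=rewrite | github.com/JofredG/TIP102 | u2_s2_a1.py | find_balanced_subsequence
-- ===== SOURCE A (Python) =====
-- def find_balanced_subsequence(art_pieces):
--     freq = {}
--     for item in art_pieces:
--         if item in freq:
--             freq[item] += 1
--         else:
--             freq[item] = 1
--
--     max = 0
--     for i in freq:
--         if i + 1 in freq:
--             if freq[i] + freq[i + 1] > max:
--                 max = freq[i] + freq[i + 1]
--     return max
-- ===== SOURCE B (Python) =====
-- def find_balanced_subsequence(art_pieces):
--     freq = {}
--     for x in art_pieces:
--         freq[x] = freq.get(x, 0) + 1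
--     vals = sorted(freq)
--     best = 0
--     for prev, cur in zip(vals, vals[1:]):
--         if cur == prev + 1:
--             best = max(best, freq[prev] + freq[cur])
--     return best
-- ===== Notes on version B (the rewrite author's own statement) =====
-- stated objective: alternative
-- what changed: Instead of probing the hash table for i+1 from every key, B sorts the distinct values once and finds consecutive pairs by a single pairwise scan over adjacent sorted values.
import Mathlib
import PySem

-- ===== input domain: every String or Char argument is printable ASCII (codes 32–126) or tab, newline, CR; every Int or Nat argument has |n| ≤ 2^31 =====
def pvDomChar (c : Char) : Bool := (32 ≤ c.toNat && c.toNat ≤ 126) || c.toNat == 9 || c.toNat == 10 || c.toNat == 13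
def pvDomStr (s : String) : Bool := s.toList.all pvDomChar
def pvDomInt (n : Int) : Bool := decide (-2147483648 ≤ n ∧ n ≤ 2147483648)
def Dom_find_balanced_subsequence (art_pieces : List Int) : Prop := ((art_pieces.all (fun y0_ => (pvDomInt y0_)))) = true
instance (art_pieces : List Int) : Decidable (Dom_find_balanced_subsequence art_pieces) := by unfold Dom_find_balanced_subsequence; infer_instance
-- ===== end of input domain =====

-- B replaces A's per-key hash probe for i+1 by a pairwise scan over the sorted distinct values (alternative decomposition, not claimed faster).

-- ===== PORT A =====
def find_balanced_subsequence (art_pieces : List Int) : Int :=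
  let freq : PySem.Dict Int Int :=
    art_pieces.foldl
      (fun d item =>
        if d.contains item then d.insert item (d.getD item 0 + 1)
        else d.insert item 1)
      PySem.Dict.empty
  freq.keys.foldl
    (fun m i =>
      if freq.contains (i + 1) then
        if freq.getD i 0 + freq.getD (i + 1) 0 > m then freq.getD i 0 + freq.getD (i + 1) 0
        else m
      else m)
    0

-- ===== PORT B =====
def find_balanced_subsequence_alt (art_pieces : List Int) : Int :=
  let freq : PySem.Dict Int Int :=
    art_pieces.foldl (fun d x => d.insert x (d.getD x 0 + 1)) PySem.Dict.empty
  let vals := PySem.List.sorted freq.keys (fun x => x) false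
  (vals.zip (vals.drop 1)).foldl
    (fun best pc =>
      if pc.2 == pc.1 + 1 then max best (freq.getD pc.1 0 + freq.getD pc.2 0)
      else best)
    0

-- ===== PRECONDITION & SPEC =====
def Spec_find_balanced_subsequence (art_pieces : List Int) (out : Int) : Prop := out = find_balanced_subsequence_alt art_pieces
instance (art_pieces : List Int) (out : Int) : Decidable (Spec_find_balanced_subsequence art_pieces out) := by unfold Spec_find_balanced_subsequence; infer_instance

-- ===== CLAIM (what is proved, stated in full; the proofs are below) =====
def Claim_equal_find_balanced_subsequence : Prop := ∀ (art_pieces : List Int), Dom_find_balanced_subsequence art_pieces → Spec_find_balanced_subsequence art_pieces (find_balanced_subsequence art_pieces)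

-- ===== LEMMAS AND PROOFS =====

-- Both builds produce collections.Counter(art_pieces).
lemma buildA_eq_counter (l : List Int) :
    l.foldl
      (fun d item =>
        if d.contains item then d.insert item (d.getD item 0 + 1)
        else d.insert item 1)
      PySem.Dict.empty = PySem.Dict.counter l := by
  rw [← PySem.Dict.foldl_insert_getD_add_one_eq_counter]
  apply PySem.List.foldl_congr_mem
  intro d x _
  by_cases h : d.contains x
  · simp [h]
  · have hcf : d.contains x = false := by simpa using h
    have h0 : d.getD x 0 = 0 := by simp [pysem, hcf]
    simp [h, h0]

-- a "running max of a projection" fold, 0 or reached on an element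
lemma maxfold_le_of_subset (l1 l2 : List Int) (h : ∀ x ∈ l1, x ∈ l2) :
    l1.foldl max 0 ≤ l2.foldl max 0 := by
  rcases PySem.List.foldl_max_mem l1 0 with h0 | hm
  · rw [h0]; exact (PySem.List.le_foldl_max l2 0).1
  · exact (PySem.List.le_foldl_max l2 0).2 _ (h _ hm)

lemma maxfold_eq_of_mem_iff (l1 l2 : List Int) (h : ∀ x, x ∈ l1 ↔ x ∈ l2) :
    l1.foldl max 0 = l2.foldl max 0 :=
  le_antisymm (maxfold_le_of_subset _ _ fun x hx => (h x).1 hx)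
    (maxfold_le_of_subset _ _ fun x hx => (h x).2 hx)

-- consecutive members of a strictly sorted Int list are adjacent
lemma adj_of_consec (S : List Int) (hp : S.Pairwise (· < ·)) (v : Int)
    (hv : v ∈ S) (hw : v + 1 ∈ S) : (v, v + 1) ∈ S.zip (S.drop 1) := by
  induction S with
  | nil => cases hv
  | cons a t ih =>
    rcases List.pairwise_cons.1 hp with ⟨ha, hpt⟩
    rw [List.mem_cons] at hv hw
    by_cases hva : v = a
    · subst hva
      have hwt : v + 1 ∈ t := by
        rcases hw with hw | hw
        · exact absurd hw (by omega)
        · assumption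
      cases t with
      | nil => cases hwt
      | cons b t' =>
        have hab : v < b := ha b (by simp)
        have hb : b = v + 1 := by
          rw [List.mem_cons] at hwt
          rcases hwt with hwt | hwt
          · omega
          · have := (List.pairwise_cons.1 hpt).1 _ hwt; omega
        subst hb; simp
    · have hvt : v ∈ t := by
        rcases hv with hv | hv
        · exact absurd hv hva
        · assumption
      have hwt : v + 1 ∈ t := by
        rcases hw with hw | hw
        · exact absurd (ha v hvt) (by omega)
        · assumption
      have := ih hpt hvt hwt
      cases t with
      | nil => cases hvt
      | cons b t' => simpa using Or.inr this


lemma main_eq (l : List Int) :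
    find_balanced_subsequence l = find_balanced_subsequence_alt l := by
  unfold find_balanced_subsequence find_balanced_subsequence_alt
  rw [buildA_eq_counter, PySem.Dict.foldl_insert_getD_add_one_eq_counter]
  set c := PySem.Dict.counter l with hc
  set K := c.keys with hK
  set S := PySem.List.sorted K (fun x => x) false with hS
  -- A's loop as a max-fold over a filtered, mapped list
  have hA : K.foldl
      (fun m i =>
        if c.contains (i + 1) then
          if c.getD i 0 + c.getD (i + 1) 0 > m then c.getD i 0 + c.getD (i + 1) 0
          else m
        else m) 0
      = ((K.filter (fun i => c.contains (i + 1))).map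
          (fun i => c.getD i 0 + c.getD (i + 1) 0)).foldl max 0 := by
    rw [List.foldl_map]
    rw [← PySem.List.foldl_if_eq_foldl_filter]
    apply PySem.List.foldl_congr_mem
    intro m i _
    by_cases h : c.contains (i + 1)
    · simp only [h, if_true]
      split_ifs with h2 <;> omega
    · simp [h]
  -- B's loop likewise
  have hB : (S.zip (S.drop 1)).foldl
      (fun best pc =>
        if pc.2 == pc.1 + 1 then max best (c.getD pc.1 0 + c.getD pc.2 0)
        else best) 0
      = (((S.zip (S.drop 1)).filter (fun pc => pc.2 == pc.1 + 1)).map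
          (fun pc => c.getD pc.1 0 + c.getD pc.2 0)).foldl max 0 := by
    rw [List.foldl_map]
    rw [← PySem.List.foldl_if_eq_foldl_filter]
  rw [hA, hB]
  -- the two candidate lists have the same members
  have hperm : S.Perm K := PySem.List.sorted_perm K (fun x => x) false
  have hlt : S.Pairwise (· < ·) := by
    rw [hS, hK, hc, PySem.Dict.keys_counter]
    exact PySem.List.sorted_ofList_pairwise_lt l
  apply maxfold_eq_of_mem_iff
  intro x
  constructor
  · intro hx
    rcases List.mem_map.1 hx with ⟨i, hi, hfx⟩
    rcases List.mem_filter.1 hi with ⟨hiK, hcond⟩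
    have hi1K : i + 1 ∈ K := (PySem.Dict.contains_iff_mem_keys _ _).1 (by simpa using hcond)
    have hadj : (i, i + 1) ∈ S.zip (S.drop 1) :=
      adj_of_consec S hlt i (hperm.mem_iff.2 hiK) (hperm.mem_iff.2 hi1K)
    refine List.mem_map.2 ⟨(i, i + 1), List.mem_filter.2 ⟨hadj, by simp⟩, by simpa using hfx⟩
  · intro hx
    rcases List.mem_map.1 hx with ⟨p, hp, hfx⟩
    rcases List.mem_filter.1 hp with ⟨hpz, hcond⟩
    have hp2 : p.2 = p.1 + 1 := by simpa using hcond
    obtain ⟨a, b, rfl⟩ : ∃ a b, p = (a, b) := ⟨p.1, p.2, rfl⟩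
    rcases List.of_mem_zip hpz with ⟨haS, hbS⟩
    have haK : a ∈ K := hperm.mem_iff.1 haS
    have hbK : b ∈ K := hperm.mem_iff.1 (List.mem_of_mem_drop hbS)
    simp only at hp2
    subst hp2
    refine List.mem_map.2 ⟨a, List.mem_filter.2 ⟨haK, ?_⟩, by simpa using hfx⟩
    simpa using (PySem.Dict.contains_iff_mem_keys _ _).2 hbK

-- ===== VERDICT (by name: the statement is the Claim_ definition above) =====
theorem find_balanced_subsequence_spec : Claim_equal_find_balanced_subsequence := by
  intro l _
  exact main_eq l
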